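-- pv_equiv track=rewrite | github.com/ThorbenP/wow-faction-rep-guides-for-guidelime | guides_generator/output/sub_guide.py | step_count
-- ===== SOURCE A (Python) =====
-- def step_count(quests: list[dict]) -> dict:
--     """Count expected QA / QC / QT stops in a quest list."""
--     qa = sum(1 for q in quests if q.get('pickup_coords'))
--     qc = sum(1 for q in quests if q.get('objective_coords'))
--     qt = sum(1 for q in quests if q.get('turnin_coords'))
--     no_pickup = sum(1 for q in quests if not q.get('pickup_coords') and not q.get('is_bridge'))
--     no_turnin = sum(1 for q in quests if not q.get('turnin_coords'))
--     return {
--         'qa': qa, 'qc': qc, 'qt': qt,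
--         'total_steps': qa + qc + qt,
--         'rep_quests_no_pickup': no_pickup,
--         'quests_no_turnin': no_turnin,
--     }
-- ===== SOURCE B (Python) =====
-- def step_count(quests: list[dict]) -> dict:
--     """Count expected QA / QC / QT stops in a quest list."""
--     qa = qc = qt = no_pickup = no_turnin = 0
--     for q in quests:
--         pickup = q.get('pickup_coords')
--         objective = q.get('objective_coords')
--         turnin = q.get('turnin_coords')
--         bridge = q.get('is_bridge')
--         if pickup:
--             qa += 1
--         elif not bridge:
--             no_pickup += 1
--         if objective:
--             qc += 1
--         if turnin:
--             qt += 1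
--         else:
--             no_turnin += 1
--     return {
--         'qa': qa, 'qc': qc, 'qt': qt,
--         'total_steps': qa + qc + qt,
--         'rep_quests_no_pickup': no_pickup,
--         'quests_no_turnin': no_turnin,
--     }
-- ===== Notes on version B (the rewrite author's own statement) =====
-- stated objective: alternative
-- what changed: Replaces five separate generator scans over the quest list with a single loop that reads each quest's fields once and updates five accumulators.
import Mathlib
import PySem

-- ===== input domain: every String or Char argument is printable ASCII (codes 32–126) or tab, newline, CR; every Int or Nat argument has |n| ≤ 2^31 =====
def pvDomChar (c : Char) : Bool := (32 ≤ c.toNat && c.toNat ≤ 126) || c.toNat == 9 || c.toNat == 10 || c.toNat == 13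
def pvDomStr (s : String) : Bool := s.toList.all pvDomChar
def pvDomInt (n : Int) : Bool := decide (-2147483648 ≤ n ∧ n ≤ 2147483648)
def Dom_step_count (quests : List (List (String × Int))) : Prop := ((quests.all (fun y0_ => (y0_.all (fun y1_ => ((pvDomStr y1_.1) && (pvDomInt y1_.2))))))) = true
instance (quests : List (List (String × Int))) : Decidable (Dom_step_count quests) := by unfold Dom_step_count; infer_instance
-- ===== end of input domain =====

-- B makes one pass with five accumulators instead of A's five scans; same return value (alternative decomposition).

-- truthiness of q.get(k) for an int-valued dict: missing key and 0 are falsy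
def pvTruthy (o : Option Int) : Bool :=
  match o with
  | some v => v != 0
  | none => false

def pvGetQ (q : List (String × Int)) (k : String) : Option Int :=
  (PySem.Dict.mk q).get? k

-- ===== PORT A =====
def step_count (quests : List (List (String × Int))) : List (String × Int) :=
  let qa := quests.foldl (fun n q => if pvTruthy (pvGetQ q "pickup_coords") then n + 1 else n) (0 : Int)
  let qc := quests.foldl (fun n q => if pvTruthy (pvGetQ q "objective_coords") then n + 1 else n) (0 : Int)
  let qt := quests.foldl (fun n q => if pvTruthy (pvGetQ q "turnin_coords") then n + 1 else n) (0 : Int)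
  let no_pickup := quests.foldl
    (fun n q => if !pvTruthy (pvGetQ q "pickup_coords") && !pvTruthy (pvGetQ q "is_bridge") then n + 1 else n) (0 : Int)
  let no_turnin := quests.foldl (fun n q => if !pvTruthy (pvGetQ q "turnin_coords") then n + 1 else n) (0 : Int)
  [("qa", qa), ("qc", qc), ("qt", qt),
   ("total_steps", qa + qc + qt),
   ("rep_quests_no_pickup", no_pickup),
   ("quests_no_turnin", no_turnin)]

-- ===== PORT B =====
-- one pass: (qa, qc, qt, no_pickup, no_turnin)
def step_count_alt (quests : List (List (String × Int))) : List (String × Int) :=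
  let s := quests.foldl
    (fun (acc : Int × Int × Int × Int × Int) q =>
      let pickup := pvGetQ q "pickup_coords"
      let objective := pvGetQ q "objective_coords"
      let turnin := pvGetQ q "turnin_coords"
      let bridge := pvGetQ q "is_bridge"
      let (qa, qc, qt, np, nt) := acc
      let (qa, np) :=
        if pvTruthy pickup then (qa + 1, np)
        else if !pvTruthy bridge then (qa, np + 1)
        else (qa, np)
      let qc := if pvTruthy objective then qc + 1 else qc
      let (qt, nt) := if pvTruthy turnin then (qt + 1, nt) else (qt, nt + 1)
      (qa, qc, qt, np, nt))
    (0, 0, 0, 0, 0)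
  let (qa, qc, qt, np, nt) := s
  [("qa", qa), ("qc", qc), ("qt", qt),
   ("total_steps", qa + qc + qt),
   ("rep_quests_no_pickup", np),
   ("quests_no_turnin", nt)]

-- ===== PRECONDITION & SPEC =====
def Spec_step_count (quests : List (List (String × Int))) (out : List (String × Int)) : Prop := out = step_count_alt quests
instance (quests : List (List (String × Int))) (out : List (String × Int)) : Decidable (Spec_step_count quests out) := by unfold Spec_step_count; infer_instance

-- ===== CLAIM (what is proved, stated in full; the proofs are below) =====
def Claim_equal_step_count : Prop := ∀ (quests : List (List (String × Int))), Dom_step_count quests → Spec_step_count quests (step_count quests)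

-- ===== LEMMAS AND PROOFS =====

-- A-side scan: foldl with a conditional +1 counts the predicate
theorem foldl_count (P : List (String × Int) → Bool) :
    ∀ (qs : List (List (String × Int))) (a : Int),
      qs.foldl (fun n q => if P q then n + 1 else n) a = a + (qs.countP P : Int) := by
  intro qs
  induction qs with
  | nil => intro a; simp
  | cons q qs ih =>
      intro a
      simp only [List.foldl_cons, List.countP_cons, ih]
      by_cases h : P q <;> simp [h]
      ring

-- B-side single pass computes the five counts at once
theorem foldl_five :
    ∀ (qs : List (List (String × Int))) (a c t p u : Int),
      qs.foldl
        (fun (acc : Int × Int × Int × Int × Int) q =>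
          let pickup := pvGetQ q "pickup_coords"
          let objective := pvGetQ q "objective_coords"
          let turnin := pvGetQ q "turnin_coords"
          let bridge := pvGetQ q "is_bridge"
          let (qa, qc, qt, np, nt) := acc
          let (qa, np) :=
            if pvTruthy pickup then (qa + 1, np)
            else if !pvTruthy bridge then (qa, np + 1)
            else (qa, np)
          let qc := if pvTruthy objective then qc + 1 else qc
          let (qt, nt) := if pvTruthy turnin then (qt + 1, nt) else (qt, nt + 1)
          (qa, qc, qt, np, nt))
        (a, c, t, p, u)
      = (a + (qs.countP (fun q => pvTruthy (pvGetQ q "pickup_coords")) : Int),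
         c + (qs.countP (fun q => pvTruthy (pvGetQ q "objective_coords")) : Int),
         t + (qs.countP (fun q => pvTruthy (pvGetQ q "turnin_coords")) : Int),
         p + (qs.countP (fun q => !pvTruthy (pvGetQ q "pickup_coords") && !pvTruthy (pvGetQ q "is_bridge")) : Int),
         u + (qs.countP (fun q => !pvTruthy (pvGetQ q "turnin_coords")) : Int)) := by
  intro qs
  induction qs with
  | nil => intro a c t p u; simp
  | cons q qs ih =>
      intro a c t p u
      rw [List.foldl_cons]
      by_cases h1 : pvTruthy (pvGetQ q "pickup_coords") <;>
        by_cases h2 : pvTruthy (pvGetQ q "objective_coords") <;>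
        by_cases h3 : pvTruthy (pvGetQ q "turnin_coords") <;>
        by_cases h4 : pvTruthy (pvGetQ q "is_bridge") <;>
        simp only [h1, h2, h3, h4, Bool.not_true, Bool.not_false, if_true, if_false,
          Bool.false_eq_true, List.countP_cons] <;>
        rw [ih] <;>
        simp [Prod.ext_iff] <;>
        and_intros <;> ring

-- ===== VERDICT (by name: the statement is the Claim_ definition above) =====
theorem step_count_spec : Claim_equal_step_count := by
  intro quests _
  unfold Spec_step_count step_count step_count_alt
  simp only [foldl_count, foldl_five]
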